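-- pv_equiv track=rewrite | github.com/RichardVong192/Cosc262 | Lab1/Lab1_Q13.py | sort_of
-- ===== SOURCE A (Python) =====
-- def sort_of(numbers):
--     alist = []
--     if numbers == []:
--         return alist
--     else:
--         alist.append(numbers[-1])
--         i = len(numbers) - 1
--         for h in range(len(numbers)-1):
--             if alist[-1] <= numbers[i-h-1]:
--                 alist.append(alist[-1])
--             else:
--                 alist.append(numbers[i-h-1])
--         return alist[::-1]
-- ===== SOURCE B (Python) =====
-- def sort_of(numbers):
--     return [min(numbers[i:]) for i in range(len(numbers))]
-- ===== Notes on version B (the rewrite author's own statement) =====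
-- stated objective: simpler
-- what changed: Replaces A's backwards running-minimum pass with appended list and final reversal by a one-line comprehension taking min(numbers[i:]) for each index directly.
import Mathlib
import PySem

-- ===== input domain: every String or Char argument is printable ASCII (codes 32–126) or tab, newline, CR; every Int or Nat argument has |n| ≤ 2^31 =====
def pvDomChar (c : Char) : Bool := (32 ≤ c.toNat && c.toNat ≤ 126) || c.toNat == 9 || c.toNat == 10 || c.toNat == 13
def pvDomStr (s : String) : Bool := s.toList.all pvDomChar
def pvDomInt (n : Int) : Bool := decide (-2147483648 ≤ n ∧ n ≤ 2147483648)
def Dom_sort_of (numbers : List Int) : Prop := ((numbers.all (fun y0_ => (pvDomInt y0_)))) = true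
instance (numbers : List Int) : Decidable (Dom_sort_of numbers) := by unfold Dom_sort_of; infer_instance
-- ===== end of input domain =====

-- B is a one-line comprehension taking min(numbers[i:]) per index instead of A's
-- running-minimum pass with a final reversal; same values, simpler (but O(n^2)).

-- ===== PORT A =====
-- literal transliteration of A: build alist back-to-front with a running minimum, then alist[::-1]
def sort_of (numbers : List Int) : List Int :=
  if numbers = [] then []
  else
    let i : Int := (numbers.length : Int) - 1
    let alist :=
      (PySem.List.pyRange 0 ((numbers.length : Int) - 1) 1).foldl
        (fun alist h =>
          if PySem.List.pyGetD alist (-1) 0 ≤ PySem.List.pyGetD numbers (i - h - 1) 0 then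
            alist ++ [PySem.List.pyGetD alist (-1) 0]
          else
            alist ++ [PySem.List.pyGetD numbers (i - h - 1) 0])
        [PySem.List.pyGetD numbers (-1) 0]
    (PySem.List.slice? alist none none (-1)).getD []

-- ===== PORT B =====
-- [min(numbers[i:]) for i in range(len(numbers))]; the slice numbers[i:] is nonempty
-- for i < len(numbers), so min?'s .getD 0 default is never used
def sort_of_alt (numbers : List Int) : List Int :=
  (List.range numbers.length).map (fun (idx : Nat) =>
    (PySem.List.min? (PySem.List.slice numbers (some ((idx : Nat) : Int)) none) (fun x => x)).getD 0)

-- ===== PRECONDITION & SPEC =====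
def Spec_sort_of (numbers : List Int) (out : List Int) : Prop := out = sort_of_alt numbers
instance (numbers : List Int) (out : List Int) : Decidable (Spec_sort_of numbers out) := by unfold Spec_sort_of; infer_instance

-- ===== CLAIM (what is proved, stated in full; the proofs are below) =====
def Claim_equal_sort_of : Prop := ∀ (numbers : List Int), Dom_sort_of numbers → Spec_sort_of numbers (sort_of numbers)

-- ===== LEMMAS AND PROOFS =====

/-- minimum of a list in Python's loop shape (0 on empty, never used there) -/
def msuf : List Int → Int
  | [] => 0
  | x :: t => t.foldl min x

theorem foldl_min_pull (t : List Int) : ∀ a b : Int, t.foldl min (min a b) = min a (t.foldl min b) := by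
  induction t with
  | nil => intro a b; rfl
  | cons c t ih =>
    intro a b
    simp only [List.foldl_cons, min_assoc, ih]

theorem msuf_cons (x : Int) (ys : List Int) (h : ys ≠ []) :
    msuf (x :: ys) = min x (msuf ys) := by
  cases ys with
  | nil => exact absurd rfl h
  | cons y t => simp [msuf, foldl_min_pull]

theorem drop_pred (l : List Int) (h : l ≠ []) : l.drop (l.length - 1) = [l.getLast h] := by
  induction l with
  | nil => exact absurd rfl h
  | cons x t ih =>
    cases t with
    | nil => simp
    | cons y s =>
      have := ih (by simp)
      simpa [List.getLast] using this

theorem sort_of_alt_eq (l : List Int) :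
    sort_of_alt l = (List.range l.length).map (fun i => msuf (l.drop i)) := by
  unfold sort_of_alt
  apply List.map_congr_left
  intro i hi
  rw [List.mem_range] at hi
  rw [PySem.List.slice_from_natCast]
  have hne : l.drop i ≠ [] := by
    intro hnil
    have := congrArg List.length hnil
    simp at this
    omega
  cases hdrop : l.drop i with
  | nil => exact absurd hdrop hne
  | cons y t => rw [PySem.List.min?_id_cons]; rfl

theorem loop_invariant (l : List Int) (h : l ≠ []) (t : Nat) (ht : t ≤ l.length - 1) :
    (PySem.List.pyRange 0 (t : Int) 1).foldl
        (fun alist hh =>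
          if PySem.List.pyGetD alist (-1) 0 ≤ PySem.List.pyGetD l (((l.length - 1 : Nat) : Int) - hh - 1) 0 then
            alist ++ [PySem.List.pyGetD alist (-1) 0]
          else
            alist ++ [PySem.List.pyGetD l (((l.length - 1 : Nat) : Int) - hh - 1) 0])
        [PySem.List.pyGetD l (-1) 0]
      = (List.range (t + 1)).map (fun j => msuf (l.drop (l.length - 1 - j))) := by
  have hlen : 0 < l.length := List.length_pos_iff.mpr h
  induction t with
  | zero =>
    rw [PySem.List.pyRange_one_eq_nil (by omega)]
    have hr1 : List.range (0 + 1) = [0] := rfl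
    rw [List.foldl_nil, hr1]
    simp only [List.map_cons, List.map_nil, Nat.sub_zero]
    rw [PySem.List.pyGetD_neg_one l 0 h, drop_pred l h]
    rfl
  | succ t ih =>
    have ht' : t ≤ l.length - 1 := by omega
    have hcast : ((t + 1 : Nat) : Int) = (t : Int) + 1 := by push_cast; ring
    rw [hcast, PySem.List.pyRange_one_succ_right (by positivity), List.foldl_append,
      ih ht', List.foldl_cons, List.foldl_nil]
    -- the last element of the accumulator is msuf (l.drop (l.length - 1 - t))
    have hlast : PySem.List.pyGetD
        ((List.range (t + 1)).map (fun j => msuf (l.drop (l.length - 1 - j)))) (-1) 0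
        = msuf (l.drop (l.length - 1 - t)) := by
      have hr : List.range (t + 1) = List.range t ++ [t] := List.range_succ
      rw [hr, List.map_append]
      exact PySem.List.pyGetD_neg_one_append_singleton
        ((List.range t).map (fun j => msuf (l.drop (l.length - 1 - j))))
        (msuf (l.drop (l.length - 1 - t))) 0
    -- the indexed element: l[(len-1) - t - 1] = l[l.length - 2 - t]
    have hidx : PySem.List.pyGetD l (((l.length - 1 : Nat) : Int) - (t : Int) - 1) 0
        = l[l.length - 2 - t]'(by omega) := by
      have h1 : ((l.length - 1 : Nat) : Int) - (t : Int) - 1 = ((l.length - 2 - t : Nat) : Int) := by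
        omega
      rw [h1, PySem.List.pyGetD_natCast]
      exact List.getD_eq_getElem l 0 (by omega)
    rw [hlast, hidx]
    -- new value appended equals msuf (l.drop (l.length - 1 - (t+1)))
    have hdropc : l.drop (l.length - 2 - t)
        = l[l.length - 2 - t]'(by omega) :: l.drop (l.length - 1 - t) := by
      have := List.drop_eq_getElem_cons (l := l) (i := l.length - 2 - t) (by omega)
      rw [this]
      have h2 : l.length - 2 - t + 1 = l.length - 1 - t := by omega
      rw [h2]
    have hne2 : l.drop (l.length - 1 - t) ≠ [] := by
      intro hnil
      have := congrArg List.length hnil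
      simp at this
      omega
    have hnewval : msuf (l.drop (l.length - 1 - (t + 1)))
        = min (l[l.length - 2 - t]'(by omega)) (msuf (l.drop (l.length - 1 - t))) := by
      have harith : l.length - 1 - (t + 1) = l.length - 2 - t := by omega
      rw [harith, hdropc, msuf_cons _ _ hne2]
    have hrange : List.range (t + 1 + 1) = List.range (t + 1) ++ [t + 1] := List.range_succ
    rw [hrange, List.map_append, List.map_singleton, hnewval]
    -- if m ≤ v then m else v  =  min v m
    rcases le_or_gt (msuf (l.drop (l.length - 1 - t))) (l[l.length - 2 - t]'(by omega)) with hc | hc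
    · rw [if_pos hc]
      rw [min_eq_right hc]
    · rw [if_neg (not_le.mpr hc)]
      rw [min_eq_left (le_of_lt hc)]

theorem reverse_suffix_map (l : List Int) :
    ((List.range l.length).map (fun j => msuf (l.drop (l.length - 1 - j)))).reverse
      = (List.range l.length).map (fun i => msuf (l.drop i)) := by
  apply List.ext_getElem
  · simp
  · intro k h1 h2
    simp only [List.length_reverse, List.length_map, List.length_range] at h1 h2
    rw [List.getElem_reverse]
    simp only [List.length_map, List.length_range, List.getElem_map, List.getElem_range]
    congr 1
    congr 1
    omega

-- ===== VERDICT (by name: the statement is the Claim_ definition above) =====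
theorem sort_of_spec : Claim_equal_sort_of := by
  intro numbers _hdom
  unfold Spec_sort_of
  by_cases h : numbers = []
  · subst h; rfl
  · unfold sort_of
    rw [if_neg h]
    have hlen : 0 < numbers.length := List.length_pos_iff.mpr h
    have hcast : ((numbers.length : Int) - 1) = ((numbers.length - 1 : Nat) : Int) := by
      push_cast [Nat.cast_sub (by omega : 1 ≤ numbers.length)]; ring
    simp only [hcast]
    rw [loop_invariant numbers h (numbers.length - 1) le_rfl]
    rw [PySem.List.slice?_none_none_neg_one, Option.getD_some]
    have : numbers.length - 1 + 1 = numbers.length := by omega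
    rw [this, reverse_suffix_map, sort_of_alt_eq]
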